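-- pv_equiv track=rewrite | github.com/HormyAJP/advent_of_code_2024 | 6.py | simulate_guard
-- ===== SOURCE A (Python) =====
-- from enum import Enum
--
-- class Direction(Enum):
--     UP = 1
--     DOWN = 2
--     LEFT = 3
--     RIGHT = 4
--
-- class StuckInLoop(Exception):
--     pass
--
-- def find_start_position(grid):
--     for y in range(len(grid)):
--         for x in range(len(grid[y])):
--             if grid[y][x] == '^':
--                 return x, y
--
-- def simulate_guard(grid):
--     x, y = find_start_position(grid)
--     direction = Direction.UP
--
--     visited = {}
--     while 1:
--         if (x, y) not in visited:
--             visited[(x, y)] = []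
--         else:
--             if direction in visited[(x, y)]:
--                 raise StuckInLoop()
--         visited[(x, y)].append(direction)
--         if direction == Direction.UP:
--             if y == 0:
--                 break
--             if grid[y - 1][x] == '#':
--                 direction = Direction.RIGHT
--                 continue
--             y -= 1
--             continue
--         elif direction == Direction.DOWN:
--             if y == len(grid) - 1:
--                 break
--             if grid[y + 1][x] == '#':
--                 direction = Direction.LEFT
--                 continue
--             y += 1
--             continue
--         elif direction == Direction.LEFT:
--             if x == 0:
--                 break
--             if grid[y][x - 1] == '#':
--                 direction = Direction.UP
--                 continue
--             x -= 1
--             continue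
--         elif direction == Direction.RIGHT:
--             if x == len(grid[y]) - 1:
--                 break
--             if grid[y][x + 1] == '#':
--                 direction = Direction.DOWN
--                 continue
--             x += 1
--             continue
--     return len(visited.keys())
-- ===== SOURCE B (Python) =====
-- class StuckInLoop(Exception):
--     pass
--
--
-- def simulate_guard(grid):
--     # find the start: first row containing '^', first '^' in it
--     for y, row in enumerate(grid):
--         if '^' in row:
--             x = row.find('^')
--             break
--     # pigeonhole budget: any walk longer than this must repeat a
--     # (cell, direction) state, i.e. the guard is stuck in a loop
--     budget = 4 * sum(len(row) + 1 for row in grid) + len(grid) + 8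
--     dx, dy = 0, -1          # facing up
--     visited = set()         # cells
--     while True:
--         # one straight run, up to the next obstacle or off the grid
--         while True:
--             if budget == 0:
--                 raise StuckInLoop()
--             budget -= 1
--             visited.add((x, y))
--             nx, ny = x + dx, y + dy
--             if ny < 0 or ny >= len(grid) or nx < 0 or nx >= len(grid[ny]):
--                 return len(visited)
--             if grid[ny][nx] == '#':
--                 break
--             x, y = nx, ny
--         dx, dy = -dy, dx    # turn right at the obstacle
-- ===== Notes on version B (the rewrite author's own statement) =====
-- stated objective: simpler
-- what changed: B drops A's Direction enum, four per-direction branches and the dict mapping each cell to the list of directions seen there: it walks the grid one straight run at a time (inner loop per run, vector rotation (dx,dy)->(-dy,dx) to turn), keeps visited cells in a plain set, and detects loops by a pigeonhole step budget instead of recording (cell, direction) states.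
import Mathlib
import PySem

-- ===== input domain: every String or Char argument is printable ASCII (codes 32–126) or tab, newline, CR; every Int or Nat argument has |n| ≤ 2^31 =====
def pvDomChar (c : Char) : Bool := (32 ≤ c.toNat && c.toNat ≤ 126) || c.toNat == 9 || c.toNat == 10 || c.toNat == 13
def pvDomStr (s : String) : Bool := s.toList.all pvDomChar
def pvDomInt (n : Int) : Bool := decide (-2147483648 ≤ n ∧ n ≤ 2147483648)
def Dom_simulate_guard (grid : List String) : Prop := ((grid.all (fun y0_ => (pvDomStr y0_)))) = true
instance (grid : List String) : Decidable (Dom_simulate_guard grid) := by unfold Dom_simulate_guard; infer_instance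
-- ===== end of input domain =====

-- B replaces A's per-cell Direction-enum loop with a dict mapping each cell to the list of
-- directions seen there (A's loop-detection state) by a run-based walk: an inner loop walks one
-- straight run at a time over a plain set of cells, turning is a vector rotation, and loops are
-- detected by a pigeonhole step budget instead of recording directions per cell (objective:
-- simpler; same asymptotic cost).

-- ===== PORT A =====

inductive PyDir where
  | up | down | left | right
deriving DecidableEq, Repr

-- fuel for the ports' 'while' loops: exceeds the number of iterations any non-looping walk can
-- make (it is also Source B's pigeonhole budget, where it is part of the algorithm itself)
def pvFuel (grid : List String) : Nat :=
  4 * (grid.map (fun r => r.toList.length + 1)).sum + grid.length + 8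

-- inner 'for x in range(len(grid[y]))' scan of find_start_position
def findRowA (row : List Char) (x : Nat) : Option Nat :=
  match row with
  | [] => none
  | c :: rest => if c = '^' then some x else findRowA rest (x + 1)

-- outer 'for y in range(len(grid))' scan of find_start_position
def findStartA (rows : List String) (y : Nat) : Option (Int × Int) :=
  match rows with
  | [] => none
  | r :: rest =>
      match findRowA r.toList 0 with
      | some x => some ((x : Int), (y : Int))
      | none => findStartA rest (y + 1)

-- 'while 1' loop of A; fuel-bounded (the fuel exceeds the number of iterations the Python loop
-- can make before it breaks or raises); the value at fuel 0 / StuckInLoop / IndexError is a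
-- sentinel reached only outside Pre_ (where Python A raises).
def loopA (grid : List String) : Nat → Int → Int → PyDir → PySem.Dict (Int × Int) (List PyDir) → Int
  | 0, _, _, _, visited => ((PySem.Dict.keys visited).length : Int)
  | fuel + 1, x, y, dir, visited =>
      let ds := PySem.Dict.getD visited (x, y) []
      if PySem.Dict.contains visited (x, y) && ds.contains dir then
        ((PySem.Dict.keys visited).length : Int)          -- raise StuckInLoop()
      else
        let visited := PySem.Dict.insert visited (x, y) (ds ++ [dir])
        match dir with
        | .up =>
            if y = 0 then ((PySem.Dict.keys visited).length : Int)
            else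
              match PySem.List.pyGet? grid (y - 1) with
              | none => ((PySem.Dict.keys visited).length : Int)       -- unreachable (0 ≤ y-1 < len)
              | some row =>
                  match PySem.Str.pyGet? row x with
                  | none => ((PySem.Dict.keys visited).length : Int)   -- IndexError
                  | some c =>
                      if c = '#' then loopA grid fuel x y .right visited
                      else loopA grid fuel x (y - 1) .up visited
        | .down =>
            if y = (grid.length : Int) - 1 then ((PySem.Dict.keys visited).length : Int)
            else
              match PySem.List.pyGet? grid (y + 1) with
              | none => ((PySem.Dict.keys visited).length : Int)       -- IndexError
              | some row =>
                  match PySem.Str.pyGet? row x with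
                  | none => ((PySem.Dict.keys visited).length : Int)   -- IndexError
                  | some c =>
                      if c = '#' then loopA grid fuel x y .left visited
                      else loopA grid fuel x (y + 1) .down visited
        | .left =>
            if x = 0 then ((PySem.Dict.keys visited).length : Int)
            else
              match PySem.List.pyGet? grid y with
              | none => ((PySem.Dict.keys visited).length : Int)
              | some row =>
                  match PySem.Str.pyGet? row (x - 1) with
                  | none => ((PySem.Dict.keys visited).length : Int)   -- IndexError
                  | some c =>
                      if c = '#' then loopA grid fuel x y .up visited
                      else loopA grid fuel (x - 1) y .left visited
        | .right =>
            match PySem.List.pyGet? grid y with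
            | none => ((PySem.Dict.keys visited).length : Int)
            | some row =>
                if x = PySem.Str.len row - 1 then ((PySem.Dict.keys visited).length : Int)
                else
                  match PySem.Str.pyGet? row (x + 1) with
                  | none => ((PySem.Dict.keys visited).length : Int)   -- IndexError
                  | some c =>
                      if c = '#' then loopA grid fuel x y .down visited
                      else loopA grid fuel (x + 1) y .right visited

def simulate_guard (grid : List String) : Int :=
  match findStartA grid 0 with
  | none => 0          -- Python raises TypeError here (no '^'); outside Pre_
  | some (x, y) => loopA grid (pvFuel grid) x y .up PySem.Dict.empty

-- ===== PORT B =====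

-- "for y, row in enumerate(grid): if '^' in row: x = row.find('^'); break"
def findStartB (rows : List String) (y : Nat) : Option (Int × Int) :=
  match rows with
  | [] => none
  | r :: rest =>
      if PySem.Str.isIn "^" r then some ((PySem.Str.find r "^"), (y : Int))
      else findStartB rest (y + 1)

-- outcome of one straight run (inner 'while True' of Source B)
inductive RunOut where
  | stuck                    -- budget exhausted: raise StuckInLoop()
  | exit                     -- walked off the grid: return len(visited)
  | turn (x y : Int)         -- hit '#': break out to rotate
deriving DecidableEq, Repr

-- inner 'while True' of Source B: walk one straight run; the Nat argument is Source B's own 'budget'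
-- counter; returns (budget left, visited, outcome)
def runB (grid : List String) :
    Nat → Int → Int → Int → Int → PySem.Set (Int × Int) →
    Nat × PySem.Set (Int × Int) × RunOut
  | 0, _, _, _, _, visited => (0, visited, .stuck)
  | b + 1, x, y, dx, dy, visited =>
      let visited := PySem.Set.add visited (x, y)
      let nx := x + dx
      let ny := y + dy
      if ny < 0 ∨ (grid.length : Int) ≤ ny then (b, visited, .exit)
      else
        match PySem.List.pyGet? grid ny with
        | none => (b, visited, .exit)                                  -- unreachable (ny in range)
        | some row =>
            if nx < 0 ∨ PySem.Str.len row ≤ nx then (b, visited, .exit)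
            else
              match PySem.Str.pyGet? row nx with
              | none => (b, visited, .exit)                            -- unreachable (nx in range)
              | some c =>
                  if c = '#' then (b, visited, .turn x y)
                  else runB grid b nx ny dx dy visited

-- outer 'while True' of Source B: run, then rotate clockwise; the first Nat is Lean termination
-- scaffolding only (each run consumes at least one budget unit, so it never runs out first)
def loopB (grid : List String) :
    Nat → Nat → Int → Int → Int → Int → PySem.Set (Int × Int) → Int
  | 0, _, _, _, _, _, visited => PySem.Set.len visited
  | f + 1, budget, x, y, dx, dy, visited =>
      match runB grid budget x y dx dy visited with
      | (_, v, .stuck) => PySem.Set.len v                              -- raise StuckInLoop()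
      | (_, v, .exit) => PySem.Set.len v
      | (b', v, .turn x' y') => loopB grid f b' x' y' (-dy) dx v

def simulate_guard_alt (grid : List String) : Int :=
  match findStartB grid 0 with
  | none => 0          -- Python raises NameError here (no '^'); outside Pre_
  | some (x, y) => loopB grid (pvFuel grid + 1) (pvFuel grid) x y 0 (-1) PySem.Set.empty

-- ===== PRECONDITION & SPEC =====

-- first '^' in the grid (first row containing one, first column in it), independent of both ports
def pvStart : List String → Option (Nat × Nat)
  | [] => none
  | r :: rest =>
      if '^' ∈ r.toList then some (r.toList.idxOf '^', 0)
      else (pvStart rest).map (fun p => (p.1, p.2 + 1))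

def vecOf : PyDir → Int × Int
  | .up => (0, -1) | .right => (1, 0) | .down => (0, 1) | .left => (-1, 0)

def turnR : PyDir → PyDir
  | .up => .right | .right => .down | .down => .left | .left => .up

-- one step of the guard's walk (the function both programs implement): none = off the grid
def pvStep (grid : List String) (x y : Int) (d : PyDir) : Option (Int × Int × PyDir) :=
  let nx := x + (vecOf d).1
  let ny := y + (vecOf d).2
  if ny < 0 ∨ (grid.length : Int) ≤ ny then none
  else
    match PySem.List.pyGet? grid ny with
    | none => none
    | some row =>
        if nx < 0 ∨ PySem.Str.len row ≤ nx then none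
        else
          match PySem.Str.pyGet? row nx with
          | none => none
          | some c => if c = '#' then some (x, y, turnR d) else some (nx, ny, d)

-- the full walk: list of all (x, y, direction) states, ending with the state that steps off
def pvWalk (grid : List String) : Nat → Int → Int → PyDir → Option (List (Int × Int × PyDir))
  | 0, _, _, _ => none
  | fu + 1, x, y, d =>
      match pvStep grid x y d with
      | none => some [(x, y, d)]
      | some s => (pvWalk grid fu s.1 s.2.1 s.2.2).map ((x, y, d) :: ·)

-- A breaks (instead of raising IndexError) only at these boundary exits
def pvABreak (grid : List String) : Int × Int × PyDir → Bool
  | (x, y, d) =>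
      match d with
      | .up => y == 0
      | .down => y == (grid.length : Int) - 1
      | .left => x == 0
      | .right => x == PySem.Str.len (grid.getD y.toNat "") - 1

-- Pre_ holds exactly when A returns normally: there is a '^'; the walk (whose length, by
-- pigeonhole on (cell, direction) states, is below pvFuel unless the guard loops) terminates;
-- no (cell, direction) state repeats (A raises StuckInLoop); and the walk leaves the grid at a
-- boundary A tests before indexing (otherwise A raises IndexError on a ragged grid). A's
-- returning is a property of the walk itself, so no simpler closed form exists.
def pvPreB (grid : List String) : Bool :=
  match pvStart grid with
  | none => false
  | some (sx, sy) =>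
      match pvWalk grid (pvFuel grid) (sx : Int) (sy : Int) .up with
      | none => false
      | some l => decide l.Nodup && pvABreak grid (l.getLastD (0, 0, .up))

def Pre_simulate_guard (grid : List String) : Prop := pvPreB grid = true

instance (grid : List String) : Decidable (Pre_simulate_guard grid) := by
  unfold Pre_simulate_guard; infer_instance

def pvWitness_simulate_guard : List String := ["..", "#.", "^."]

def Spec_simulate_guard (grid : List String) (out : Int) : Prop := out = simulate_guard_alt grid
instance (grid : List String) (out : Int) : Decidable (Spec_simulate_guard grid out) := by
  unfold Spec_simulate_guard; infer_instance

-- ===== CLAIM (what is proved, stated in full; the proofs are below) =====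
def Claim_equal_simulate_guard : Prop :=
  ∀ (grid : List String), Dom_simulate_guard grid → Pre_simulate_guard grid →
    Spec_simulate_guard grid (simulate_guard grid)

-- ===== LEMMAS AND PROOFS =====

def pvCell (s : Int × Int × PyDir) : Int × Int := (s.1, s.2.1)

-- the guard's position is on the grid
def pvInB (grid : List String) (s : Int × Int × PyDir) : Prop :=
  0 ≤ s.2.1 ∧ s.2.1 < (grid.length : Int) ∧
  0 ≤ s.1 ∧ s.1 < ((grid.getD s.2.1.toNat "").toList.length : Int)

theorem pv_walk_length (grid : List String) :
    ∀ (fu : Nat) (x y : Int) (d : PyDir) (l : List (Int × Int × PyDir)),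
      pvWalk grid fu x y d = some l → l.length ≤ fu ∧ l ≠ [] := by
  intro fu
  induction fu with
  | zero => intro x y d l h; simp [pvWalk] at h
  | succ m ih =>
    intro x y d l h
    simp only [pvWalk] at h
    cases hs : pvStep grid x y d with
    | none => rw [hs] at h; simp at h; subst h; simp
    | some s =>
      rw [hs] at h
      dsimp only at h
      cases hw : pvWalk grid m s.1 s.2.1 s.2.2 with
      | none => rw [hw] at h; simp at h
      | some l2 =>
        rw [hw] at h; simp at h
        have := ih s.1 s.2.1 s.2.2 l2 hw
        subst h; simp; omega

theorem pv_step_inB (grid : List String) (x y : Int) (d : PyDir)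
    (s : Int × Int × PyDir) (h : pvStep grid x y d = some s)
    (hin : pvInB grid (x, y, d)) : pvInB grid s := by
  simp only [pvStep] at h
  by_cases h1 : (y + (vecOf d).2 < 0 ∨ (grid.length : Int) ≤ y + (vecOf d).2)
  · rw [if_pos h1] at h; simp at h
  · rw [if_neg h1] at h
    push Not at h1
    cases hr : PySem.List.pyGet? grid (y + (vecOf d).2) with
    | none => rw [hr] at h; simp at h
    | some row =>
      rw [hr] at h
      dsimp only at h
      by_cases h2 : (x + (vecOf d).1 < 0 ∨ PySem.Str.len row ≤ x + (vecOf d).1)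
      · rw [if_pos h2] at h; simp at h
      · rw [if_neg h2] at h
        push Not at h2
        cases hc : PySem.Str.pyGet? row (x + (vecOf d).1) with
        | none => rw [hc] at h; simp at h
        | some c =>
          rw [hc] at h
          dsimp only at h
          have hrow : row = grid.getD (y + (vecOf d).2).toNat "" := by
            rw [PySem.List.pyGet?_of_nonneg grid h1.1] at hr
            have hlt : (y + (vecOf d).2).toNat < grid.length := by omega
            rw [List.getElem?_eq_getElem hlt] at hr
            rw [List.getD_eq_getElem grid "" hlt]
            exact (Option.some.injEq _ _ ▸ hr).symm
          by_cases hcc : c = '#'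
          · rw [if_pos hcc] at h
            obtain ⟨hx, hy, hz, hw⟩ := hin
            cases h; exact ⟨hx, hy, hz, hw⟩
          · rw [if_neg hcc] at h
            cases h
            refine ⟨h1.1, h1.2, h2.1, ?_⟩
            rw [← hrow]
            simpa [PySem.Str.len] using h2.2

theorem pv_len_card {α : Type} [DecidableEq α] (K L : List α) (hnd : K.Nodup)
    (hm : ∀ c, c ∈ K ↔ c ∈ L) : K.length = L.toFinset.card := by
  rw [← List.toFinset_card_of_nodup hnd]
  congr 1
  ext c
  simp [hm c]

theorem pv_loopA_spec (grid : List String) :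
    ∀ (l : List (Int × Int × PyDir)) (fu fuel : Nat) (x y : Int) (d : PyDir)
      (visited : PySem.Dict (Int × Int) (List PyDir)) (consumed : List (Int × Int × PyDir)),
      pvWalk grid fu x y d = some l →
      l.length ≤ fuel →
      pvInB grid (x, y, d) →
      (consumed ++ l).Nodup →
      (∀ s, l.getLast? = some s → pvABreak grid s = true) →
      (∀ x' y' d', d' ∈ PySem.Dict.getD visited (x', y') [] ↔ (x', y', d') ∈ consumed) →
      (PySem.Dict.keys visited).Nodup →
      (∀ c, c ∈ PySem.Dict.keys visited ↔ c ∈ consumed.map pvCell) →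
      loopA grid fuel x y d visited = (((consumed ++ l).map pvCell).toFinset.card : Int) := by
  intro l
  induction l with
  | nil =>
    intro fu fuel x y d visited consumed hw
    exact absurd (pv_walk_length grid fu x y d [] hw).2 (by simp)
  | cons s0 l2 ih =>
    intro fu fuel x y d visited consumed hw hlen hin hnd hlast hdict hknd hkmem
    cases fu with
    | zero => simp [pvWalk] at hw
    | succ m =>
    cases fuel with
    | zero => simp at hlen
    | succ f1 =>
    simp only [pvWalk] at hw
    -- the raise-check never fires: (x, y, d) is a fresh state
    have hfresh : (x, y, d) ∉ consumed := by
      have hdisj := List.disjoint_of_nodup_append hnd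
      intro hmem
      have hs0l : s0 ∈ s0 :: l2 := List.mem_cons_self
      have hs0 : s0 = (x, y, d) := by
        cases hsx : pvStep grid x y d with
        | none => rw [hsx] at hw; simp at hw; exact hw.1.symm
        | some s =>
          rw [hsx] at hw; dsimp only at hw
          cases hw2 : pvWalk grid m s.1 s.2.1 s.2.2 with
          | none => rw [hw2] at hw; simp at hw
          | some l2' => rw [hw2] at hw; simp at hw; exact hw.1.symm
      exact hdisj hmem (hs0 ▸ hs0l)
    have hcontains : (PySem.Dict.getD visited (x, y) []).contains d = false := by
      rw [List.contains_eq_mem]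
      simp only [decide_eq_false_iff_not]
      rw [hdict x y d]
      exact hfresh
    have hcheck : (PySem.Dict.contains visited (x, y) &&
        (PySem.Dict.getD visited (x, y) []).contains d) = false := by
      rw [hcontains, Bool.and_false]
    -- the inserted dict maintains the invariants
    set W := PySem.Dict.insert visited (x, y) (PySem.Dict.getD visited (x, y) [] ++ [d]) with hWdef
    have hdict' : ∀ x' y' d', d' ∈ PySem.Dict.getD W (x', y') [] ↔
        (x', y', d') ∈ consumed ++ [(x, y, d)] := by
      intro x' y' d'
      rw [hWdef, PySem.Dict.getD_insert]
      by_cases hxy : ((x' : Int), (y' : Int)) = (x, y)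
      · rw [if_pos hxy]
        obtain ⟨hx, hy⟩ := Prod.mk.injEq .. ▸ hxy
        subst hx; subst hy
        simp [hdict x' y' d']
      · rw [if_neg hxy]
        rw [hdict x' y' d']
        have : ((x', y', d') = (x, y, d)) ↔ False := by
          constructor
          · intro hh
            apply hxy
            obtain ⟨h1, h2, _⟩ := Prod.mk.injEq .. ▸ hh
            simp_all
          · exact False.elim
        simp [this]
    have hknd' : (PySem.Dict.keys W).Nodup := PySem.Dict.nodup_keys_insert _ _ _ hknd
    have hkmem' : ∀ c, c ∈ PySem.Dict.keys W ↔ c ∈ (consumed ++ [(x, y, d)]).map pvCell := by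
      intro c
      rw [hWdef, PySem.Dict.mem_keys_insert]
      rw [hkmem c]
      simp [pvCell]
      exact or_comm
    have hcard : ((PySem.Dict.keys W).length : Int)
        = (((consumed ++ [(x, y, d)]).map pvCell).toFinset.card : Int) := by
      rw [pv_len_card (PySem.Dict.keys W) ((consumed ++ [(x, y, d)]).map pvCell) hknd' hkmem']
    have hinp : 0 ≤ y ∧ y < (grid.length : Int) ∧ 0 ≤ x ∧
        x < ((grid.getD y.toNat "").toList.length : Int) := hin
    obtain ⟨hy0, hyH, hx0, hxW⟩ := hinp
    cases hs : pvStep grid x y d with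
    | none =>
      rw [hs] at hw; simp at hw
      obtain ⟨hs0, hl2⟩ := hw
      subst hl2
      have hab : pvABreak grid (x, y, d) = true := by
        have := hlast s0 (by simp)
        rw [← hs0] at this
        exact this
      cases d with
      | up =>
        simp only [pvABreak, beq_iff_eq] at hab
        simp only [loopA, hcheck, Bool.false_eq_true, if_false, if_pos hab, ← hWdef]
        rw [hcard, ← hs0]
      | down =>
        simp only [pvABreak, beq_iff_eq] at hab
        simp only [loopA, hcheck, Bool.false_eq_true, if_false, if_pos hab, ← hWdef]
        rw [hcard, ← hs0]
      | left =>
        simp only [pvABreak, beq_iff_eq] at hab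
        simp only [loopA, hcheck, Bool.false_eq_true, if_false, if_pos hab, ← hWdef]
        rw [hcard, ← hs0]
      | right =>
        simp only [pvABreak, beq_iff_eq] at hab
        have hrow : PySem.List.pyGet? grid y = some (grid.getD y.toNat "") := by
          rw [PySem.List.pyGet?_of_nonneg grid hy0]
          have hlt : y.toNat < grid.length := by omega
          rw [List.getElem?_eq_getElem hlt, List.getD_eq_getElem grid "" hlt]
        simp only [loopA, hcheck, Bool.false_eq_true, if_false, hrow, if_pos hab, ← hWdef]
        rw [hcard, ← hs0]
    | some s =>
      rw [hs] at hw; dsimp only at hw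
      cases hw2 : pvWalk grid m s.1 s.2.1 s.2.2 with
      | none => rw [hw2] at hw; simp at hw
      | some l2' =>
      rw [hw2] at hw; simp at hw
      obtain ⟨hs0, hl2⟩ := hw
      subst hl2
      have hl2ne : l2' ≠ [] := (pv_walk_length grid m s.1 s.2.1 s.2.2 l2' hw2).2
      have hlast2 : ∀ s', l2'.getLast? = some s' → pvABreak grid s' = true := by
        intro s' hgl
        apply hlast
        cases l2' with
        | nil => simp at hgl
        | cons b t => rw [List.getLast?_cons_cons]; exact hgl
      have hnd2 : ((consumed ++ [(x, y, d)]) ++ l2').Nodup := by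
        rw [List.append_assoc]
        rw [hs0]
        simpa using hnd
      have hlen2 : l2'.length ≤ f1 := by simp at hlen; omega
      have hinS : pvInB grid s := pv_step_inB grid x y d s hs ⟨hy0, hyH, hx0, hxW⟩
      have hcardeq : (((consumed ++ [(x, y, d)]) ++ l2').map pvCell).toFinset.card
          = ((consumed ++ s0 :: l2').map pvCell).toFinset.card := by
        rw [List.append_assoc, hs0]
        rfl
      -- invert pvStep = some s
      simp only [pvStep] at hs
      by_cases h1 : (y + (vecOf d).2 < 0 ∨ (grid.length : Int) ≤ y + (vecOf d).2)
      · rw [if_pos h1] at hs; simp at hs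
      · rw [if_neg h1] at hs
        cases hr : PySem.List.pyGet? grid (y + (vecOf d).2) with
        | none => rw [hr] at hs; simp at hs
        | some row =>
          rw [hr] at hs; dsimp only at hs
          by_cases h2 : (x + (vecOf d).1 < 0 ∨ PySem.Str.len row ≤ x + (vecOf d).1)
          · rw [if_pos h2] at hs; simp at hs
          · rw [if_neg h2] at hs
            cases hc : PySem.Str.pyGet? row (x + (vecOf d).1) with
            | none => rw [hc] at hs; simp at hs
            | some c =>
              rw [hc] at hs; dsimp only at hs
              push Not at h1 h2
              cases d with
              | up =>
                simp only [vecOf] at h1 h2 hr hc hs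
                have hy1 : y + -1 = y - 1 := by ring
                have hx1 : x + 0 = x := by ring
                rw [hy1] at hr
                rw [hx1] at hc hs
                have hyne : ¬ (y = 0) := by omega
                simp only [loopA, hcheck, Bool.false_eq_true, if_false, if_neg hyne,
                  hr, hc, ← hWdef]
                by_cases hcc : c = '#'
                · rw [if_pos hcc]
                  rw [if_pos hcc] at hs
                  rw [ih m f1 x y .right W (consumed ++ [(x, y, PyDir.up)])
                    (by rw [← Option.some.inj hs] at hw2; exact hw2) hlen2
                    (by rw [← Option.some.inj hs] at hinS; exact hinS)
                    hnd2 hlast2 hdict' hknd' hkmem']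
                  rw [hcardeq]
                · rw [if_neg hcc]
                  rw [if_neg hcc] at hs
                  rw [show y - 1 = y + -1 by ring]
                  rw [ih m f1 x (y + -1) .up W (consumed ++ [(x, y, PyDir.up)])
                    (by rw [← Option.some.inj hs] at hw2; exact hw2) hlen2
                    (by rw [← Option.some.inj hs] at hinS; exact hinS)
                    hnd2 hlast2 hdict' hknd' hkmem']
                  rw [hcardeq]
              | down =>
                simp only [vecOf] at h1 h2 hr hc hs
                have hx1 : x + 0 = x := by ring
                rw [hx1] at hc hs
                have hyne : ¬ (y = (grid.length : Int) - 1) := by omega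
                simp only [loopA, hcheck, Bool.false_eq_true, if_false, if_neg hyne,
                  hr, hc, ← hWdef]
                by_cases hcc : c = '#'
                · rw [if_pos hcc]
                  rw [if_pos hcc] at hs
                  rw [ih m f1 x y .left W (consumed ++ [(x, y, PyDir.down)])
                    (by rw [← Option.some.inj hs] at hw2; exact hw2) hlen2
                    (by rw [← Option.some.inj hs] at hinS; exact hinS)
                    hnd2 hlast2 hdict' hknd' hkmem']
                  rw [hcardeq]
                · rw [if_neg hcc]
                  rw [if_neg hcc] at hs
                  rw [ih m f1 x (y + 1) .down W (consumed ++ [(x, y, PyDir.down)])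
                    (by rw [← Option.some.inj hs] at hw2; exact hw2) hlen2
                    (by rw [← Option.some.inj hs] at hinS; exact hinS)
                    hnd2 hlast2 hdict' hknd' hkmem']
                  rw [hcardeq]
              | left =>
                simp only [vecOf] at h1 h2 hr hc hs
                have hy1 : y + 0 = y := by ring
                have hx1 : x + -1 = x - 1 := by ring
                rw [hy1] at hr hs
                rw [hx1] at hc hs
                have hxne : ¬ (x = 0) := by omega
                have hrow : PySem.List.pyGet? grid y = some row := hr
                simp only [loopA, hcheck, Bool.false_eq_true, if_false, if_neg hxne,
                  hrow, hc, ← hWdef]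
                by_cases hcc : c = '#'
                · rw [if_pos hcc]
                  rw [if_pos hcc] at hs
                  rw [ih m f1 x y .up W (consumed ++ [(x, y, PyDir.left)])
                    (by rw [← Option.some.inj hs] at hw2; exact hw2) hlen2
                    (by rw [← Option.some.inj hs] at hinS; exact hinS)
                    hnd2 hlast2 hdict' hknd' hkmem']
                  rw [hcardeq]
                · rw [if_neg hcc]
                  rw [if_neg hcc] at hs
                  rw [ih m f1 (x - 1) y .left W (consumed ++ [(x, y, PyDir.left)])
                    (by rw [← Option.some.inj hs] at hw2; exact hw2) hlen2
                    (by rw [← Option.some.inj hs] at hinS; exact hinS)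
                    hnd2 hlast2 hdict' hknd' hkmem']
                  rw [hcardeq]
              | right =>
                simp only [vecOf] at h1 h2 hr hc hs
                have hy1 : y + 0 = y := by ring
                rw [hy1] at hr hs
                have hxne : ¬ (x = PySem.Str.len row - 1) := by omega
                simp only [loopA, hcheck, Bool.false_eq_true, if_false, hr, if_neg hxne,
                  hc, ← hWdef]
                by_cases hcc : c = '#'
                · rw [if_pos hcc]
                  rw [if_pos hcc] at hs
                  rw [ih m f1 x y .down W (consumed ++ [(x, y, PyDir.right)])
                    (by rw [← Option.some.inj hs] at hw2; exact hw2) hlen2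
                    (by rw [← Option.some.inj hs] at hinS; exact hinS)
                    hnd2 hlast2 hdict' hknd' hkmem']
                  rw [hcardeq]
                · rw [if_neg hcc]
                  rw [if_neg hcc] at hs
                  rw [ih m f1 (x + 1) y .right W (consumed ++ [(x, y, PyDir.right)])
                    (by rw [← Option.some.inj hs] at hw2; exact hw2) hlen2
                    (by rw [← Option.some.inj hs] at hinS; exact hinS)
                    hnd2 hlast2 hdict' hknd' hkmem']
                  rw [hcardeq]

theorem pv_runB_spec (grid : List String) :
    ∀ (l : List (Int × Int × PyDir)) (fu b : Nat) (x y : Int) (d : PyDir)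
      (visited : PySem.Set (Int × Int)) (C : List (Int × Int)),
      pvWalk grid fu x y d = some l →
      l.length ≤ b →
      pvInB grid (x, y, d) →
      visited.Nodup →
      (∀ c, c ∈ visited ↔ c ∈ C) →
      ∃ (t r : List (Int × Int × PyDir)) (v' : PySem.Set (Int × Int)),
        l = t ++ r ∧ t ≠ [] ∧ v'.Nodup ∧
        (∀ c, c ∈ v' ↔ c ∈ C ∨ c ∈ t.map pvCell) ∧
        ((r = [] ∧ runB grid b x y (vecOf d).1 (vecOf d).2 visited = (b - t.length, v', .exit))
         ∨ (∃ x' y' : Int,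
              runB grid b x y (vecOf d).1 (vecOf d).2 visited = (b - t.length, v', .turn x' y')
              ∧ pvWalk grid (fu - t.length) x' y' (turnR d) = some r
              ∧ pvInB grid (x', y', turnR d))) := by
  intro l
  induction l with
  | nil =>
    intro fu b x y d visited C hw
    exact absurd (pv_walk_length grid fu x y d [] hw).2 (by simp)
  | cons s0 l2 ih =>
    intro fu b x y d visited C hw hlen hin hvnd hvmem
    cases fu with
    | zero => simp [pvWalk] at hw
    | succ m =>
      simp only [pvWalk] at hw
      cases b with
      | zero => simp at hlen
      | succ b1 =>
      have hmem1 : ∀ c, c ∈ PySem.Set.add visited (x, y) ↔ c ∈ C ∨ c = (x, y) := by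
        intro c; rw [PySem.Set.mem_add]; rw [hvmem c]
      cases hs : pvStep grid x y d with
      | none =>
        rw [hs] at hw; simp at hw
        obtain ⟨hs0, hl2⟩ := hw
        refine ⟨[(x, y, d)], [], PySem.Set.add visited (x, y), by simp [← hs0, hl2], by simp,
          PySem.Set.nodup_add visited _ hvnd, by simpa [pvCell] using hmem1, Or.inl ⟨rfl, ?_⟩⟩
        -- pvStep = none forces one of runB's exit branches
        simp only [pvStep] at hs
        simp only [runB, List.length_cons, List.length_nil, Nat.add_sub_cancel, Nat.zero_add]
        by_cases h1 : (y + (vecOf d).2 < 0 ∨ (grid.length : Int) ≤ y + (vecOf d).2)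
        · rw [if_pos h1] at hs ⊢
        · rw [if_neg h1] at hs ⊢
          cases hr : PySem.List.pyGet? grid (y + (vecOf d).2) with
          | none => rfl
          | some row =>
            rw [hr] at hs
            dsimp only at hs ⊢
            by_cases h2 : (x + (vecOf d).1 < 0 ∨ PySem.Str.len row ≤ x + (vecOf d).1)
            · rw [if_pos h2] at hs ⊢
            · rw [if_neg h2] at hs ⊢
              cases hc : PySem.Str.pyGet? row (x + (vecOf d).1) with
              | none => rfl
              | some c =>
                rw [hc] at hs
                dsimp only at hs ⊢
                by_cases hcc : c = '#' <;> simp [hcc] at hs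
      | some s =>
        rw [hs] at hw; dsimp only at hw
        cases hw2 : pvWalk grid m s.1 s.2.1 s.2.2 with
        | none => rw [hw2] at hw; simp at hw
        | some l2' =>
          rw [hw2] at hw; simp at hw
          obtain ⟨hs0, hl2⟩ := hw
          -- invert pvStep = some s
          simp only [pvStep] at hs
          by_cases h1 : (y + (vecOf d).2 < 0 ∨ (grid.length : Int) ≤ y + (vecOf d).2)
          · rw [if_pos h1] at hs; simp at hs
          · rw [if_neg h1] at hs
            cases hr : PySem.List.pyGet? grid (y + (vecOf d).2) with
            | none => rw [hr] at hs; simp at hs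
            | some row =>
              rw [hr] at hs; dsimp only at hs
              by_cases h2 : (x + (vecOf d).1 < 0 ∨ PySem.Str.len row ≤ x + (vecOf d).1)
              · rw [if_pos h2] at hs; simp at hs
              · rw [if_neg h2] at hs
                cases hc : PySem.Str.pyGet? row (x + (vecOf d).1) with
                | none => rw [hc] at hs; simp at hs
                | some c =>
                  rw [hc] at hs; dsimp only at hs
                  have hrunB : runB grid (b1 + 1) x y (vecOf d).1 (vecOf d).2 visited
                      = (if c = '#' then (b1, PySem.Set.add visited (x, y), RunOut.turn x y)
                         else runB grid b1 (x + (vecOf d).1) (y + (vecOf d).2) (vecOf d).1 (vecOf d).2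
                                (PySem.Set.add visited (x, y))) := by
                    simp only [runB]
                    rw [if_neg h1, hr]
                    dsimp only
                    rw [if_neg h2, hc]
                  by_cases hcc : c = '#'
                  · rw [if_pos hcc] at hs
                    have hseq : s = (x, y, turnR d) := by exact (Option.some.injEq _ _ ▸ hs).symm
                    refine ⟨[s0], l2, PySem.Set.add visited (x, y), by simp, by simp,
                      PySem.Set.nodup_add visited _ hvnd, ?_, Or.inr ⟨x, y, ?_, ?_, ?_⟩⟩
                    · intro cc
                      rw [hmem1 cc]
                      simp [← hs0, pvCell]
                    · rw [hrunB, if_pos hcc]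
                      simp
                    · rw [← hl2]
                      simpa [hseq] using hw2
                    · exact ⟨hin.1, hin.2.1, hin.2.2⟩
                  · rw [if_neg hcc] at hs
                    have hseq : s = (x + (vecOf d).1, y + (vecOf d).2, d) := by
                      exact (Option.some.injEq _ _ ▸ hs).symm
                    have hin2 : pvInB grid (x + (vecOf d).1, y + (vecOf d).2, d) := by
                      have := pv_step_inB grid x y d s (by
                        simp only [pvStep]
                        rw [if_neg h1, hr]
                        dsimp only
                        rw [if_neg h2, hc]
                        dsimp only
                        rw [if_neg hcc, hseq]) hin
                      rwa [hseq] at this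
                    obtain ⟨t', r, v', hsplit, htne, hvnd', hvmem', hout⟩ :=
                      ih m b1 (x + (vecOf d).1) (y + (vecOf d).2) d
                        (PySem.Set.add visited (x, y)) (C ++ [(x, y)])
                        (by rw [← hl2]; rw [hseq] at hw2; exact hw2)
                        (by simpa using hlen)
                        hin2
                        (PySem.Set.nodup_add visited _ hvnd)
                        (by intro c2; rw [hmem1 c2]; simp)
                    refine ⟨s0 :: t', r, v', by simp [hsplit], by simp, hvnd', ?_, ?_⟩
                    · intro c2
                      rw [hvmem' c2]
                      simp [← hs0, pvCell]
                      tauto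
                    · have hred : runB grid (b1 + 1) x y (vecOf d).1 (vecOf d).2 visited
                          = runB grid b1 (x + (vecOf d).1) (y + (vecOf d).2) (vecOf d).1 (vecOf d).2
                              (PySem.Set.add visited (x, y)) := by
                        rw [hrunB, if_neg hcc]
                      rcases hout with ⟨hre, heq⟩ | ⟨x2, y2, heq, hwr, hinr⟩
                      · exact Or.inl ⟨hre, by rw [hred, heq]; simp [Nat.succ_sub_succ]⟩
                      · exact Or.inr ⟨x2, y2, by rw [hred, heq]; simp [Nat.succ_sub_succ],
                          by simpa [Nat.succ_sub_succ] using hwr, hinr⟩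

theorem pv_vec_turn (d : PyDir) : vecOf (turnR d) = (-(vecOf d).2, (vecOf d).1) := by
  cases d <;> rfl

theorem pv_loopB_spec (grid : List String) :
    ∀ (f : Nat) (l : List (Int × Int × PyDir)) (fu b : Nat) (x y : Int) (d : PyDir)
      (visited : PySem.Set (Int × Int)) (C : List (Int × Int)),
      pvWalk grid fu x y d = some l →
      l.length ≤ b →
      l.length < f →
      pvInB grid (x, y, d) →
      visited.Nodup →
      (∀ c, c ∈ visited ↔ c ∈ C) →
      loopB grid f b x y (vecOf d).1 (vecOf d).2 visited
        = (((C ++ l.map pvCell).toFinset.card : Nat) : Int) := by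
  intro f
  induction f with
  | zero => intro l fu b x y d visited C _ _ h; omega
  | succ f1 ih =>
    intro l fu b x y d visited C hw hlen hltf hin hvnd hvmem
    obtain ⟨t, r, v', hsplit, htne, hvnd', hvmem', hout⟩ :=
      pv_runB_spec grid l fu b x y d visited C hw hlen hin hvnd hvmem
    have htlen : 1 ≤ t.length := by
      cases t with
      | nil => exact absurd rfl htne
      | cons a u => simp
    rcases hout with ⟨hre, heq⟩ | ⟨x', y', heq, hwr, hinr⟩
    · simp only [loopB]
      rw [heq]
      dsimp only
      have : PySem.Set.len v' = ((v'.length : Nat) : Int) := rfl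
      rw [this, pv_len_card v' (C ++ l.map pvCell) hvnd']
      intro c
      rw [hvmem' c]
      simp [hsplit, hre]
    · simp only [loopB]
      rw [heq]
      dsimp only
      have h1 : -(vecOf d).2 = (vecOf (turnR d)).1 := by rw [pv_vec_turn]
      have h2 : (vecOf d).1 = (vecOf (turnR d)).2 := by rw [pv_vec_turn]
      rw [h1, h2]
      rw [ih r (fu - t.length) (b - t.length) x' y' (turnR d) v' (C ++ t.map pvCell) hwr
        (by subst hsplit; simp at hlen ⊢; omega)
        (by subst hsplit; simp at hltf ⊢; omega)
        hinr hvnd'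
        (by intro c; rw [hvmem' c]; simp)]
      congr 2
      subst hsplit
      simp

theorem pv_findRowA_eq (row : List Char) (k : Nat) :
    findRowA row k = if '^' ∈ row then some (k + row.idxOf '^') else none := by
  induction row generalizing k with
  | nil => simp [findRowA]
  | cons c rest ih =>
    by_cases hc : c = '^'
    · subst hc; simp [findRowA, List.idxOf_cons_self]
    · simp [findRowA, hc, ih (k+1), List.idxOf_cons_ne _ (by simpa using hc)]
      by_cases hm : '^' ∈ rest <;> simp [hm, Ne.symm hc]
      omega

theorem pv_find_singleton (r : List Char) (h : '^' ∈ r) :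
    PySem.Chars.find r ['^'] = (r.idxOf '^' : Int) := by
  suffices H : ∀ (r : List Char) (k : Nat), '^' ∈ r →
      PySem.Chars.find.go ['^'] r k = (k : Int) + r.idxOf '^' by
    have := H r 0 h; simpa [PySem.Chars.find] using this
  intro r k hr
  induction r generalizing k with
  | nil => simp at hr
  | cons c rest ih =>
    by_cases hc : c = '^'
    · subst hc; simp [PySem.Chars.find.go, List.idxOf_cons_self, List.isPrefixOf]
    · have hm : '^' ∈ rest := by cases hr with | head => exact absurd rfl hc | tail _ h1 => exact h1
      simp [PySem.Chars.find.go, List.isPrefixOf, Ne.symm hc, ih _ hm,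
        List.idxOf_cons_ne _ (by simpa using hc)]
      ring

theorem pv_findStartA_eq (rows : List String) (y : Nat) :
    findStartA rows y = (pvStart rows).map (fun p => ((p.1 : Int), ((p.2 : Int) + (y : Int)))) := by
  induction rows generalizing y with
  | nil => simp [findStartA, pvStart]
  | cons r rest ih =>
    by_cases hm : '^' ∈ r.toList
    · simp [findStartA, pvStart, hm, pv_findRowA_eq]
    · simp [findStartA, pvStart, hm, pv_findRowA_eq, ih (y+1), Option.map_map]
      cases pvStart rest with
      | none => simp
      | some p => simp; ring

theorem pv_isIn_hat (r : String) : PySem.Chars.isIn ['^'] r.toList = true ↔ '^' ∈ r.toList := by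
  rw [PySem.Chars.isIn_iff_infix]
  constructor
  · intro h; exact h.mem (by simp)
  · intro h; exact (List.singleton_infix_iff '^' r.toList).mpr h

theorem pv_findStartB_eq (rows : List String) (y : Nat) :
    findStartB rows y = (pvStart rows).map (fun p => ((p.1 : Int), ((p.2 : Int) + (y : Int)))) := by
  induction rows generalizing y with
  | nil => simp [findStartB, pvStart]
  | cons r rest ih =>
    by_cases hm : '^' ∈ r.toList
    · have hin : PySem.Chars.isIn ['^'] r.toList = true := (pv_isIn_hat r).mpr hm
      have hf : PySem.Chars.find r.toList ['^'] = (r.toList.idxOf '^' : Int) :=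
        pv_find_singleton r.toList hm
      simp [findStartB, pvStart, hm, PySem.Str.isIn, PySem.Str.find, hin, hf]
    · have hin : PySem.Chars.isIn ['^'] r.toList = false := by
        rcases h : PySem.Chars.isIn ['^'] r.toList with _ | _
        · rfl
        · exact absurd ((pv_isIn_hat r).mp h) hm
      simp [findStartB, pvStart, hm, PySem.Str.isIn, hin, ih (y+1), Option.map_map]
      cases pvStart rest with
      | none => simp
      | some p => simp; ring

theorem pv_pvStart_inB (grid : List String) (sx sy : Nat)
    (h : pvStart grid = some (sx, sy)) :
    sy < grid.length ∧ sx < (grid.getD sy "").toList.length := by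
  induction grid generalizing sx sy with
  | nil => simp [pvStart] at h
  | cons r rest ih =>
    by_cases hm : '^' ∈ r.toList
    · simp [pvStart, hm] at h
      obtain ⟨hx, hy⟩ := h
      subst hx; subst hy
      exact ⟨by simp, by simpa using List.idxOf_lt_length_of_mem hm⟩
    · cases hrest : pvStart rest with
      | none => simp [pvStart, hm, hrest] at h
      | some p =>
        simp [pvStart, hm, hrest] at h
        obtain ⟨hx, hy⟩ := h
        have := ih p.1 p.2 (by rw [hrest])
        constructor
        · simp only [List.length_cons]; omega
        · have hy' : sy = p.2 + 1 := hy.symm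
          subst hy'
          simpa [hx] using this.2

-- ===== VERDICT (by name: the statement is the Claim_ definition above) =====
theorem simulate_guard_spec : Claim_equal_simulate_guard := by
  intro grid _ hpre
  unfold Pre_simulate_guard pvPreB at hpre
  cases hst : pvStart grid with
  | none => rw [hst] at hpre; simp at hpre
  | some p =>
    obtain ⟨sx, sy⟩ := p
    rw [hst] at hpre
    dsimp only at hpre
    cases hwk : pvWalk grid (pvFuel grid) (sx : Int) (sy : Int) .up with
    | none => rw [hwk] at hpre; simp at hpre
    | some l =>
      rw [hwk] at hpre
      dsimp only at hpre
      simp only [Bool.and_eq_true, decide_eq_true_eq] at hpre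
      obtain ⟨hndl, habl⟩ := hpre
      have hlne := (pv_walk_length grid _ _ _ _ l hwk).2
      have hlen := (pv_walk_length grid _ _ _ _ l hwk).1
      have hstin := pv_pvStart_inB grid sx sy hst
      have hinb : pvInB grid ((sx : Int), (sy : Int), .up) := by
        refine ⟨by positivity, ?_, by positivity, ?_⟩
        · show (sy : Int) < (grid.length : Int)
          exact_mod_cast hstin.1
        · show (sx : Int) < (((grid.getD ((sy : Int)).toNat "").toList.length : Nat) : Int)
          have hn : ((sy : Int)).toNat = sy := by simp
          rw [hn]
          exact_mod_cast hstin.2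
      have hlast : ∀ s, l.getLast? = some s → pvABreak grid s = true := by
        intro s hgl
        have hgd : l.getLastD (0, 0, .up) = s := by
          rw [List.getLastD_eq_getLast?, hgl]; rfl
        rw [← hgd]; exact habl
      unfold Spec_simulate_guard simulate_guard simulate_guard_alt
      rw [pv_findStartA_eq grid 0, pv_findStartB_eq grid 0, hst]
      simp only [Option.map_some, Nat.cast_zero, add_zero]
      have hA := pv_loopA_spec grid l (pvFuel grid) (pvFuel grid) (sx : Int) (sy : Int) .up
        PySem.Dict.empty [] hwk hlen hinb (by simpa using hndl) hlast
        (by intro x' y' d'; rw [PySem.Dict.getD_empty]; simp)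
        (by simp [PySem.Dict.keys_empty])
        (by intro c; simp [PySem.Dict.keys_empty])
      have hB := pv_loopB_spec grid (pvFuel grid + 1) l (pvFuel grid) (pvFuel grid)
        (sx : Int) (sy : Int) .up PySem.Set.empty [] hwk hlen (by omega) hinb
        (by simp [PySem.Set.empty]) (by intro c; simp [PySem.Set.empty])
      have hA' : loopA grid (pvFuel grid) (sx : Int) (sy : Int) .up PySem.Dict.empty
          = ((((([] : List (Int × Int)) ++ l.map pvCell).toFinset.card : Nat)) : Int) := by
        rw [hA]; simp
      have hB' : loopB grid (pvFuel grid + 1) (pvFuel grid) (sx : Int) (sy : Int) 0 (-1)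
          PySem.Set.empty
          = ((((([] : List (Int × Int)) ++ l.map pvCell).toFinset.card : Nat)) : Int) := hB
      rw [hA', hB']
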